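-- pv_equiv track=rewrite | github.com/Ko-udon/Algorithm | 프로그래머스/0/181881. 조건에 맞게 수열 변환하기 2/조건에 맞게 수열 변환하기 2.py | solution
-- ===== SOURCE A (Python) =====
-- def solution(arr):
--     before = arr.copy()
--     after = arr.copy()
--     n = 0
--     while True:
--         for i, v in enumerate(before):
--             if v >= 50 and v%2==0:
--                 after[i] = v // 2
--             elif v < 50 and v%2!=0:
--                 after[i] = v*2 + 1
--             else:
--                 after[i] = v
--         if before == after:
--             return n
--         else:
--             before = after.copy()
--         n+=1
-- ===== SOURCE B (Python) =====
-- def solution(arr):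
--     best = 0
--     for v in arr:
--         c = 0
--         while True:
--             if v >= 50 and v % 2 == 0:
--                 nv = v // 2
--             elif v < 50 and v % 2 != 0:
--                 nv = v * 2 + 1
--             else:
--                 nv = v
--             if nv == v:
--                 break
--             v = nv
--             c += 1
--         best = max(best, c)
--     return best
-- ===== Notes on version B (the rewrite author's own statement) =====
-- stated objective: alternative
-- what changed: B swaps the loop nesting: instead of re-scanning and rebuilding the whole array each pass and comparing full arrays until a global fixed point, B simulates each element's scalar transform independently to its own fixed point and returns the maximum per-element step count; Pre_ excludes lists containing an odd value < -1, on which A loops forever.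
import Mathlib
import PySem

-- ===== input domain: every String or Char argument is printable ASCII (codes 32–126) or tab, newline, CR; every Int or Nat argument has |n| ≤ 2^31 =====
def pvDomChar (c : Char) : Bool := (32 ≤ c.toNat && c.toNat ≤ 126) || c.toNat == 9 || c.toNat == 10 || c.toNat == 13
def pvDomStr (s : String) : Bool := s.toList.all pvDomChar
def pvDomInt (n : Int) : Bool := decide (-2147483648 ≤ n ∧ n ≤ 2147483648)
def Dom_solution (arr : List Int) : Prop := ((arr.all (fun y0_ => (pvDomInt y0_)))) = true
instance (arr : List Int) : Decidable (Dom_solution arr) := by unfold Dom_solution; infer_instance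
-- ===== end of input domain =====

-- B swaps A's loop nesting: per-element scalar simulation to a fixed point, max of step counts,
-- instead of whole-array passes to a global fixed point. Pre_ excludes inputs on which A never returns.

-- ===== PORT A =====
-- the element-wise transform (the if/elif/else chain both Pythons contain verbatim)
def pvStep (v : Int) : Int :=
  if 50 ≤ v ∧ PySem.Int.mod v 2 = 0 then PySem.Int.floordiv v 2
  else if v < 50 ∧ PySem.Int.mod v 2 ≠ 0 then v * 2 + 1
  else v

-- A's 'while True' loop; the inner 'for i, v in enumerate(before)' overwrites every index of
-- 'after', i.e. after = before.map pvStep. The while loop is totalized with fuel pvFuel, proven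
-- sufficient under Pre_solution (outside Pre_ the Python loops forever).
def pvLoopA : Nat → List Int → Int → Int
  | 0, _, n => n
  | fuel + 1, before, n =>
    let after := before.map pvStep
    if before = after then n else pvLoopA fuel after (n + 1)

def pvFuel (arr : List Int) : Nat := arr.foldl (fun m v => max m v.natAbs) 0 + 200

def solution (arr : List Int) : Int := pvLoopA (pvFuel arr) arr 0

-- ===== PORT B =====
-- B's inner 'while True' over a single element, counting changes; fuel as above.
def pvCntB : Nat → Int → Int → Int
  | 0, _, c => c
  | fuel + 1, v, c =>
    let nv := pvStep v
    if nv = v then c else pvCntB fuel nv (c + 1)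

def solution_alt (arr : List Int) : Int :=
  arr.foldl (fun best v => max best (pvCntB (v.natAbs + 200) v 0)) 0

-- ===== PRECONDITION & SPEC =====
-- Pre_ excludes lists containing an odd value below -1: on those A's while-loop never terminates
-- (e.g. -3 → -5 → -9 → …), so A returns on exactly the inputs admitted here.
def Pre_solution (arr : List Int) : Prop := ∀ v ∈ arr, PySem.Int.mod v 2 ≠ 0 → -1 ≤ v
instance (arr : List Int) : Decidable (Pre_solution arr) := by unfold Pre_solution; infer_instance
def pvWitness_solution : List Int := [100, 3, -1, 0, 49]

def Spec_solution (arr : List Int) (out : Int) : Prop := out = solution_alt arr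
instance (arr : List Int) (out : Int) : Decidable (Spec_solution arr out) := by unfold Spec_solution; infer_instance

-- ===== CLAIM (what is proved, stated in full; the proofs are below) =====
def Claim_equal_solution : Prop := ∀ (arr : List Int), Dom_solution arr → Pre_solution arr → Spec_solution arr (solution arr)

-- ===== LEMMAS AND PROOFS =====

-- pvStep in plain ediv/emod form
theorem pvStep_eq (v : Int) : pvStep v =
    (if 50 ≤ v ∧ v % 2 = 0 then v / 2 else if v < 50 ∧ v % 2 ≠ 0 then v * 2 + 1 else v) := by
  simp [pvStep]

def pvGood (v : Int) : Prop := v % 2 ≠ 0 → -1 ≤ v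

def pvMu (v : Int) : Nat := if 50 ≤ v then (v + 100).toNat else (50 - v).toNat

def pvCnt : Nat → Int → Int
  | 0, _ => 0
  | fuel + 1, v => if pvStep v = v then 0 else pvCnt fuel (pvStep v) + 1

theorem pvMu_pos (v : Int) : 1 ≤ pvMu v := by
  unfold pvMu; split_ifs <;> omega

theorem pvMu_le (v : Int) : pvMu v ≤ v.natAbs + 150 := by
  unfold pvMu; split_ifs <;> omega

theorem pvStep_of_even {v : Int} (h1 : 50 ≤ v) (h2 : v % 2 = 0) : pvStep v = v / 2 := by
  rw [pvStep_eq, if_pos ⟨h1, h2⟩]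

theorem pvStep_of_odd {v : Int} (h1 : v < 50) (h2 : v % 2 ≠ 0) : pvStep v = v * 2 + 1 := by
  rw [pvStep_eq, if_neg (by omega : ¬(50 ≤ v ∧ v % 2 = 0)), if_pos ⟨h1, h2⟩]

theorem pvStep_of_else {v : Int} (h1 : ¬(50 ≤ v ∧ v % 2 = 0)) (h2 : ¬(v < 50 ∧ v % 2 ≠ 0)) :
    pvStep v = v := by
  rw [pvStep_eq, if_neg h1, if_neg h2]

theorem pvGood_step {v : Int} (h : pvGood v) : pvGood (pvStep v) := by
  unfold pvGood at *
  by_cases h1 : 50 ≤ v ∧ v % 2 = 0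
  · rw [pvStep_of_even h1.1 h1.2]; intro hm; omega
  · by_cases h2 : v < 50 ∧ v % 2 ≠ 0
    · rw [pvStep_of_odd h2.1 h2.2]; intro hm; omega
    · rw [pvStep_of_else h1 h2]; exact h

theorem pvMu_lt {v : Int} (hg : pvGood v) (hne : pvStep v ≠ v) (hne2 : pvStep (pvStep v) ≠ pvStep v) :
    pvMu (pvStep v) < pvMu v := by
  by_cases h1 : 50 ≤ v ∧ v % 2 = 0
  · rw [pvStep_of_even h1.1 h1.2]
    unfold pvMu; split_ifs <;> omega
  · by_cases h2 : v < 50 ∧ v % 2 ≠ 0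
    · have hw := pvStep_of_odd h2.1 h2.2
      have hv1 : v ≠ -1 := by intro he; apply hne; rw [hw, he]; norm_num
      have hge : 1 ≤ v := by have := hg h2.2; omega
      rw [hw] at hne2 ⊢
      by_cases hc : 50 ≤ v * 2 + 1
      · exact absurd (pvStep_of_else (by omega) (by omega)) hne2
      · unfold pvMu; split_ifs <;> omega
    · exact absurd (pvStep_of_else h1 h2) hne

theorem pvCnt_fixed {v : Int} (h : pvStep v = v) (fuel : Nat) : pvCnt fuel v = 0 := by
  cases fuel with
  | zero => rfl
  | succ f => simp [pvCnt, h]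

theorem pvCnt_nonneg (fuel : Nat) (v : Int) : 0 ≤ pvCnt fuel v := by
  induction fuel generalizing v with
  | zero => simp [pvCnt]
  | succ f ih => simp only [pvCnt]; split_ifs with h; · omega
                 · have := ih (pvStep v); omega

theorem pvCnt_le (fuel : Nat) (v : Int) : pvCnt fuel v ≤ (fuel : Int) := by
  induction fuel generalizing v with
  | zero => simp [pvCnt]
  | succ f ih => simp only [pvCnt]; split_ifs with h
                 · omega
                 · have := ih (pvStep v); push_cast; omega

theorem pvCnt_stable : ∀ (m : Nat) (v : Int) (F F' : Nat), pvGood v → pvMu v ≤ m →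
    pvMu v ≤ F → pvMu v ≤ F' → pvCnt F v = pvCnt F' v := by
  intro m
  induction m using Nat.strong_induction_on with
  | _ m ih =>
    intro v F F' hg hm hF hF'
    have h1 := pvMu_pos v
    obtain ⟨a, rfl⟩ : ∃ a, F = a + 1 := ⟨F - 1, by omega⟩
    obtain ⟨b, rfl⟩ : ∃ b, F' = b + 1 := ⟨F' - 1, by omega⟩
    by_cases hfix : pvStep v = v
    · rw [pvCnt_fixed hfix, pvCnt_fixed hfix]
    · simp only [pvCnt, hfix, if_false]
      by_cases hfix2 : pvStep (pvStep v) = pvStep v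
      · rw [pvCnt_fixed hfix2, pvCnt_fixed hfix2]
      · have hlt := pvMu_lt hg hfix hfix2
        have : pvMu (pvStep v) < m := by omega
        rw [ih (pvMu (pvStep v)) this (pvStep v) a (pvMu (pvStep v)) (pvGood_step hg) le_rfl (by omega) le_rfl,
            ih (pvMu (pvStep v)) this (pvStep v) b (pvMu (pvStep v)) (pvGood_step hg) le_rfl (by omega) le_rfl]

def pvSteps (v : Int) : Int := pvCnt (pvMu v) v

theorem pvSteps_fixed {v : Int} (h : pvStep v = v) : pvSteps v = 0 := pvCnt_fixed h _

theorem pvSteps_nonneg (v : Int) : 0 ≤ pvSteps v := pvCnt_nonneg _ _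

theorem pvSteps_succ {v : Int} (hg : pvGood v) (h : pvStep v ≠ v) :
    pvSteps v = pvSteps (pvStep v) + 1 := by
  unfold pvSteps
  have h1 := pvMu_pos v
  obtain ⟨k, hk⟩ : ∃ k, pvMu v = k + 1 := ⟨pvMu v - 1, by omega⟩
  rw [hk]
  simp only [pvCnt, h, if_false]
  congr 1
  by_cases hfix2 : pvStep (pvStep v) = pvStep v
  · rw [pvCnt_fixed hfix2, pvCnt_fixed hfix2]
  · have hlt := pvMu_lt hg h hfix2
    exact pvCnt_stable (pvMu (pvStep v)) (pvStep v) k (pvMu (pvStep v)) (pvGood_step hg) le_rfl (by omega) le_rfl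

theorem pvCntB_eq (fuel : Nat) (v : Int) (c : Int) : pvCntB fuel v c = c + pvCnt fuel v := by
  induction fuel generalizing v c with
  | zero => simp [pvCntB, pvCnt]
  | succ f ih => simp only [pvCntB, pvCnt]; split_ifs with h
                 · simp
                 · rw [ih]; ring

-- max of per-element step counts (foldr form)
def pvMS (l : List Int) : Int := l.foldr (fun v a => max (pvSteps v) a) 0

theorem pvMS_cons (a : Int) (t : List Int) : pvMS (a :: t) = max (pvSteps a) (pvMS t) := rfl

theorem pvMS_nonneg (l : List Int) : 0 ≤ pvMS l := by
  induction l with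
  | nil => exact le_refl 0
  | cons h t ih => rw [pvMS_cons]; exact le_max_of_le_right ih

theorem pvMS_zero {l : List Int} (h : ∀ v ∈ l, pvStep v = v) : pvMS l = 0 := by
  induction l with
  | nil => rfl
  | cons a t ih =>
    rw [pvMS_cons, pvSteps_fixed (h a (by simp)), ih (fun v hv => h v (List.mem_cons_of_mem _ hv))]
    simp

theorem pvMS_dichot {l : List Int} (hg : ∀ v ∈ l, pvGood v) :
    (∀ v ∈ l, pvStep v = v) ∨ pvMS l = pvMS (l.map pvStep) + 1 := by
  induction l with
  | nil => exact Or.inl (by simp)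
  | cons a t ih =>
    have hga : pvGood a := hg a (by simp)
    have hgt : ∀ v ∈ t, pvGood v := fun v hv => hg v (List.mem_cons_of_mem _ hv)
    have hmz : (∀ v ∈ t, pvStep v = v) → pvMS (t.map pvStep) = 0 := by
      intro hall
      apply pvMS_zero
      intro w hw
      obtain ⟨u, hu, rfl⟩ := List.mem_map.mp hw
      rw [hall u hu, hall u hu]
    rcases ih hgt with hall | hsucc
    · by_cases hfa : pvStep a = a
      · exact Or.inl (by
          intro v hv
          rcases List.mem_cons.mp hv with rfl | hv
          · exact hfa
          · exact hall v hv)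
      · right
        rw [List.map_cons, pvMS_cons, pvMS_cons, pvMS_zero hall, hmz hall,
            pvSteps_succ hga hfa]
        have hn := pvSteps_nonneg (pvStep a)
        rw [max_eq_left (by omega : (0:Int) ≤ pvSteps (pvStep a) + 1),
            max_eq_left hn]
    · right
      rw [List.map_cons, pvMS_cons, pvMS_cons, hsucc]
      by_cases hfa : pvStep a = a
      · rw [pvSteps_fixed hfa, hfa, pvSteps_fixed hfa]
        have hn := pvMS_nonneg (t.map pvStep)
        rw [max_eq_right (by omega : (0:Int) ≤ pvMS (List.map pvStep t) + 1),
            max_eq_right hn]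
      · rw [pvSteps_succ hga hfa, max_add_add_right]

theorem pvMap_self_iff (l : List Int) : l = l.map pvStep ↔ ∀ v ∈ l, pvStep v = v := by
  induction l with
  | nil => simp
  | cons a t ih =>
    simp only [List.map_cons, List.cons.injEq, List.mem_cons]
    constructor
    · rintro ⟨h1, h2⟩ v hv
      rcases hv with rfl | hv
      · exact h1.symm
      · exact (ih.mp h2) v hv
    · intro h
      exact ⟨(h a (Or.inl rfl)).symm, ih.mpr (fun v hv => h v (Or.inr hv))⟩

theorem pvLoop_eq : ∀ (F : Nat) (l : List Int) (n : Int), (∀ v ∈ l, pvGood v) →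
    (∀ v ∈ l, pvStep v = v ∨ pvSteps v < (F : Int)) → pvLoopA F l n = n + pvMS l := by
  intro F
  induction F with
  | zero =>
    intro l n hg h
    have hall : ∀ v ∈ l, pvStep v = v := by
      intro v hv
      rcases h v hv with h1 | h1
      · exact h1
      · have := pvSteps_nonneg v; omega
    simp [pvLoopA, pvMS_zero hall]
  | succ F ih =>
    intro l n hg h
    simp only [pvLoopA]
    by_cases hfix : l = l.map pvStep
    · rw [if_pos hfix, pvMS_zero ((pvMap_self_iff l).mp hfix)]; ring
    · rw [if_neg hfix]
      have hgm : ∀ v ∈ l.map pvStep, pvGood v := by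
        intro v hv; obtain ⟨u, hu, rfl⟩ := List.mem_map.mp hv
        exact pvGood_step (hg u hu)
      have hm : ∀ v ∈ l.map pvStep, pvStep v = v ∨ pvSteps v < (F : Int) := by
        intro v hv; obtain ⟨u, hu, rfl⟩ := List.mem_map.mp hv
        by_cases hfu : pvStep u = u
        · left; rw [hfu, hfu]
        · rcases h u hu with h1 | h1
          · exact absurd h1 hfu
          · right; have := pvSteps_succ (hg u hu) hfu; push_cast at h1 ⊢; omega
      rw [ih (l.map pvStep) (n + 1) hgm hm]
      rcases pvMS_dichot hg with hall | hsucc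
      · exact absurd ((pvMap_self_iff l).mpr hall) hfix
      · rw [hsucc]; ring

theorem pvFoldl_max (l : List Int) : ∀ (a : Int), 0 ≤ a → (∀ v ∈ l, pvGood v) →
    l.foldl (fun best v => max best (pvCntB (v.natAbs + 200) v 0)) a = max a (pvMS l) := by
  induction l with
  | nil => intro a ha _; simp only [List.foldl]; exact (max_eq_left ha).symm
  | cons h t ih =>
    intro a ha hg
    have hgh : pvGood h := hg h (by simp)
    have hcnt : pvCntB (h.natAbs + 200) h 0 = pvSteps h := by
      rw [pvCntB_eq]
      have := pvMu_le h
      rw [pvCnt_stable (pvMu h) h (h.natAbs + 200) (pvMu h) hgh le_rfl (by omega) le_rfl]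
      simp [pvSteps]
    simp only [List.foldl, hcnt]
    rw [ih (max a (pvSteps h)) (le_trans ha (le_max_left _ _)) (fun v hv => hg v (List.mem_cons_of_mem _ hv))]
    simp only [pvMS, List.foldr]
    rw [max_assoc]

theorem pvLe_foldl_max : ∀ (l : List Int) (m : Nat), m ≤ l.foldl (fun a w => max a w.natAbs) m := by
  intro l
  induction l with
  | nil => intro m; exact le_rfl
  | cons h t ih =>
    intro m
    exact le_trans (le_max_left m h.natAbs) (ih (max m h.natAbs))

theorem pvMem_le_fold : ∀ (l : List Int) (m : Nat) (v : Int), v ∈ l →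
    v.natAbs ≤ l.foldl (fun a w => max a w.natAbs) m := by
  intro l
  induction l with
  | nil => intro m v hv; cases hv
  | cons h t ih =>
    intro m v hv
    simp only [List.foldl]
    rcases List.mem_cons.mp hv with rfl | hv
    · exact le_trans (le_max_right m v.natAbs) (pvLe_foldl_max t _)
    · exact ih _ v hv

-- ===== VERDICT (by name: the statement is the Claim_ definition above) =====
theorem solution_spec : Claim_equal_solution := by
  intro arr _hdom hpre
  unfold Spec_solution solution solution_alt
  have hg : ∀ v ∈ arr, pvGood v := by
    intro v hv
    have := hpre v hv
    unfold pvGood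
    rw [PySem.Int.mod_eq_emod_of_pos (by norm_num : (0:Int) < 2)] at this
    exact this
  have hF : ∀ v ∈ arr, pvStep v = v ∨ pvSteps v < ((pvFuel arr : Nat) : Int) := by
    intro v hv
    right
    have h1 : pvSteps v ≤ (pvMu v : Int) := by
      have := pvCnt_le (pvMu v) v; simpa [pvSteps] using this
    have h2 := pvMu_le v
    have h3 := pvMem_le_fold arr 0 v hv
    unfold pvFuel
    push_cast
    omega
  rw [pvLoop_eq (pvFuel arr) arr 0 hg hF, pvFoldl_max arr 0 le_rfl hg,
      zero_add, max_eq_right (pvMS_nonneg arr)]
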